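-- pv_equiv track=rewrite | github.com/wsuzume/fxtrade | fxtrade/interface/bitflyer.py | split_exec_list
-- ===== SOURCE A (Python) =====
-- def split_exec_list(xs: list) -> dict[str, list]:
--     table = {}
--     for x in xs:
--         day = x['exec_date'].split('T')[0]
--         if day not in table:
--             table[day] = [x]
--         else:
--             table[day].append(x)
--     return table
-- ===== SOURCE B (Python) =====
-- def split_exec_list(xs: list) -> dict[str, list]:
--     # Two-phase: collect distinct days in first-appearance order, then one filter per day.
--     key = lambda x: x['exec_date'].split('T')[0]
--     days = list(dict.fromkeys(key(x) for x in xs))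
--     return {day: [x for x in xs if key(x) == day] for day in days}
-- ===== Notes on version B (the rewrite author's own statement) =====
-- stated objective: alternative
-- what changed: Replaces A's single hash-accumulation pass (insert-or-append into a dict) with a two-phase strategy: first deduplicate the day keys in first-appearance order, then build each group with an independent filter over the input.
import Mathlib
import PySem

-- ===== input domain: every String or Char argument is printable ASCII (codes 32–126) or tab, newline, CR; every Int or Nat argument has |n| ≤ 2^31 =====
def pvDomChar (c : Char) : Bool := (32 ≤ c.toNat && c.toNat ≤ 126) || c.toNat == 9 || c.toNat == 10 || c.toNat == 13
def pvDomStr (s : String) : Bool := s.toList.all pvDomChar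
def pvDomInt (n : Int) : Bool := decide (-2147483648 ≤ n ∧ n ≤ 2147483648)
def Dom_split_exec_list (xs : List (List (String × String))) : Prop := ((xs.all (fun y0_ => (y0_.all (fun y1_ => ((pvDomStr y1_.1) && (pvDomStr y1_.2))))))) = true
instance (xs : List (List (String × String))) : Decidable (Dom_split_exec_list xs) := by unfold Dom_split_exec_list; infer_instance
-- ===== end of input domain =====

-- B replaces A's single insert-or-append dict pass by a two-phase build (dedup the day keys in first-appearance order, then one filter per day); same return value, no speed claim.

-- shared helper: day = x['exec_date'].split('T')[0] (total via defaults; Pre_ guarantees the key is present)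
def execDay (x : List (String × String)) : String :=
  PySem.List.pyGetD ((PySem.Str.split? ((PySem.Dict.mk x).getD "exec_date" "") "T").getD []) 0 ""

-- ===== PORT A =====
def split_exec_list (xs : List (List (String × String))) : List (String × List (List (String × String))) :=
  (xs.foldl (fun table x =>
      let day := execDay x
      if table.contains day = false then table.insert day [x]
      else table.modify day [] (fun l => l ++ [x]))
    PySem.Dict.empty).items

-- ===== PORT B =====
def split_exec_list_alt (xs : List (List (String × String))) : List (String × List (List (String × String))) :=
  let days := PySem.List.dedup (xs.map execDay)
  days.map (fun day => (day, xs.filter (fun x => execDay x == day)))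

-- ===== PRECONDITION & SPEC =====
-- Pre_ excludes only inputs where some execution dict lacks the 'exec_date' key: there the Python A raises KeyError (and B raises too).
def Pre_split_exec_list (xs : List (List (String × String))) : Prop :=
  ∀ x ∈ xs, "exec_date" ∈ x.map Prod.fst
instance (xs : List (List (String × String))) : Decidable (Pre_split_exec_list xs) := by unfold Pre_split_exec_list; infer_instance

def pvWitness_split_exec_list : (List (List (String × String))) :=
  [[("exec_date", "2020-01-01T10:00")], [("exec_date", "2020-01-02T09:00")], [("exec_date", "2020-01-01T11:30")]]

def Spec_split_exec_list (xs : List (List (String × String))) (out : List (String × List (List (String × String)))) : Prop := out = split_exec_list_alt xs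
instance (xs : List (List (String × String))) (out : List (String × List (List (String × String)))) : Decidable (Spec_split_exec_list xs out) := by unfold Spec_split_exec_list; infer_instance

-- ===== CLAIM (what is proved, stated in full; the proofs are below) =====
def Claim_equal_split_exec_list : Prop := ∀ (xs : List (List (String × String))), Dom_split_exec_list xs → Pre_split_exec_list xs → Spec_split_exec_list xs (split_exec_list xs)

-- ===== LEMMAS AND PROOFS =====

-- grouping a keyed pair list and projecting the payload is filtering by the key
lemma filter_map_snd (key : List (String × String) → String) (c : String) (xs : List (List (String × String))) :
    ((xs.map (fun x => (key x, x))).filter (fun p => p.1 == c)).map Prod.snd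
    = xs.filter (fun x => key x == c) := by
  induction xs with
  | nil => rfl
  | cons y ys ih => by_cases h : key y = c <;> simp [h, ih]

-- ===== VERDICT (by name: the statement is the Claim_ definition above) =====
theorem split_exec_list_spec : Claim_equal_split_exec_list := by
  intro xs _ _
  unfold Spec_split_exec_list split_exec_list split_exec_list_alt
  -- A's insert-or-append branch is dict.modify with default []
  have hstep : (fun (d : PySem.Dict String (List (List (String × String)))) x =>
      let day := execDay x
      if d.contains day = false then d.insert day [x]
      else d.modify day [] (fun l => l ++ [x]))
      = (fun d x => d.modify (execDay x) [] (fun l => l ++ [x])) := by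
    funext d x
    by_cases h : d.contains (execDay x) = false
    · simp [h, PySem.Dict.modify, PySem.Dict.getD_of_not_contains]
    · simp [h]
  rw [hstep,
    show (List.foldl (fun d x => d.modify (execDay x) [] fun l => l ++ [x]) PySem.Dict.empty xs)
      = ((xs.map (fun x => (execDay x, x))).foldl
          (fun (d : PySem.Dict String (List (List (String × String)))) p => d.modify p.1 [] (fun l => l ++ [p.2]))
          PySem.Dict.empty) from by rw [List.foldl_map]]
  have hnd : ((xs.map (fun x => (execDay x, x))).foldl
      (fun (d : PySem.Dict String (List (List (String × String)))) p => d.modify p.1 [] (fun l => l ++ [p.2]))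
      PySem.Dict.empty).keys.Nodup :=
    PySem.Dict.nodup_keys_foldl_modify_key _ Prod.fst _ _ _ PySem.Dict.nodup_keys_empty
  rw [PySem.Dict.items_eq_map_keys _ hnd []]
  rw [PySem.Dict.keys_foldl_modify_key]
  simp only [PySem.Dict.getD_foldl_modify_append, PySem.Dict.getD_empty, List.nil_append,
    PySem.Dict.keys_empty, PySem.Set.update_nil_left, List.map_map, PySem.List.dedup_eq_ofList,
    filter_map_snd, Function.comp_def]
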